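-- pv_equiv track=rewrite | github.com/inputforge/pixelbot | src/pixelbot/ui/alignment.py | align_end
-- ===== SOURCE A (Python) =====
-- def align_end(
--     axis_size: int, children_sizes: list[int], spacing: int
-- ) -> list[tuple[int, int]]:
--     x = axis_size - sum(children_sizes) - spacing * (len(children_sizes) - 1)
--     result = []
--     for size in children_sizes:
--         result.append((x, x + size))
--         x += size + spacing
--     return result
-- ===== SOURCE B (Python) =====
-- def align_end(
--     axis_size: int, children_sizes: list[int], spacing: int
-- ) -> list[tuple[int, int]]:
--     # Suffix-sum table, then one zip pass: the i-th child's right edge is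
--     # axis_size minus the sizes after it and the spacings after it.
--     n = len(children_sizes)
--     tails = [0]
--     for size in reversed(children_sizes):
--         tails.append(tails[-1] + size)
--     tails.reverse()  # tails[i] == sum(children_sizes[i:])
--     result = []
--     for k, (t0, t1) in enumerate(zip(tails, tails[1:])):
--         off = spacing * (n - 1 - k)
--         result.append((axis_size - t0 - off, axis_size - t1 - off))
--     return result
-- ===== Notes on version B (the rewrite author's own statement) =====
-- stated objective: alternative
-- what changed: Instead of computing the origin with sum() and walking forward with a running cursor, B builds a suffix-sum table of the sizes and derives each child's (left, right) directly as axis_size minus the trailing sizes and spacings, via a zip over adjacent table entries.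
import Mathlib
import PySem

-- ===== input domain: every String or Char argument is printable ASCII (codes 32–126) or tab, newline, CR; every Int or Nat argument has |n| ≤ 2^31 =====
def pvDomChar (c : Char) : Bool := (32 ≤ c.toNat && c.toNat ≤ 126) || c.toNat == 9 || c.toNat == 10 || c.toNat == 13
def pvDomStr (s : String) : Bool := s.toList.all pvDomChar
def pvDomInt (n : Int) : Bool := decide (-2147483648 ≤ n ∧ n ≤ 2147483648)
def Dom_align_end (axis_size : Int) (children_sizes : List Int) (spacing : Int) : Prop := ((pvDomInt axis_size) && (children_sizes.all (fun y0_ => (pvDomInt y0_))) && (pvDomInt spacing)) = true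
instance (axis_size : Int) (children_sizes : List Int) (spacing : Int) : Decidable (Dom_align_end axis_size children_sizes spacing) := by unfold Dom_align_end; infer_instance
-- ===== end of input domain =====

-- B replaces A's "sum() then forward cursor walk" with a suffix-sum table read off pairwise (objective: alternative decomposition).
-- ===== PORT A =====
-- A's for-loop: recursion carrying the running left coordinate x.
def alignEndGo (spacing x : Int) : List Int → List (Int × Int)
  | [] => []
  | size :: rest => (x, x + size) :: alignEndGo spacing (x + size + spacing) rest

def align_end (axis_size : Int) (children_sizes : List Int) (spacing : Int) : List (Int × Int) :=
  alignEndGo spacing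
    (axis_size - children_sizes.sum - spacing * ((children_sizes.length : Int) - 1))
    children_sizes

-- ===== PORT B =====
-- suffix-sum table: tailsOf l ! i = sum (l drop i), one entry per suffix incl. the empty one
def tailsOf : List Int → List Int
  | [] => [0]
  | s :: rest =>
    let t := tailsOf rest
    (s + t.headI) :: t

-- the zip(tails, tails[1:]) pass: k counts the remaining children after the current one
def pairOff (axis_size spacing : Int) : List Int → Int → List (Int × Int)
  | t0 :: t1 :: ts, k =>
      (axis_size - t0 - spacing * k, axis_size - t1 - spacing * k)
        :: pairOff axis_size spacing (t1 :: ts) (k - 1)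
  | _, _ => []

def align_end_alt (axis_size : Int) (children_sizes : List Int) (spacing : Int) : List (Int × Int) :=
  pairOff axis_size spacing (tailsOf children_sizes) ((children_sizes.length : Int) - 1)

-- ===== PRECONDITION & SPEC =====
def Spec_align_end (axis_size : Int) (children_sizes : List Int) (spacing : Int) (out : List (Int × Int)) : Prop := out = align_end_alt axis_size children_sizes spacing
instance (axis_size : Int) (children_sizes : List Int) (spacing : Int) (out : List (Int × Int)) : Decidable (Spec_align_end axis_size children_sizes spacing out) := by unfold Spec_align_end; infer_instance

-- ===== CLAIM (what is proved, stated in full; the proofs are below) =====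
def Claim_equal_align_end : Prop := ∀ (axis_size : Int) (children_sizes : List Int) (spacing : Int), Dom_align_end axis_size children_sizes spacing → Spec_align_end axis_size children_sizes spacing (align_end axis_size children_sizes spacing)

-- ===== LEMMAS AND PROOFS =====
lemma tailsOf_head : ∀ (l : List Int), ∃ ts, tailsOf l = l.sum :: ts := by
  intro l
  induction l with
  | nil => exact ⟨[], rfl⟩
  | cons s rest ih =>
    obtain ⟨ts, h⟩ := ih
    exact ⟨tailsOf rest, by simp [tailsOf, h]⟩

lemma pairOff_tailsOf (axis sp : Int) :
    ∀ (l : List Int) (k : Int),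
      pairOff axis sp (tailsOf l) k = alignEndGo sp (axis - l.sum - sp * k) l := by
  intro l
  induction l with
  | nil => intro k; simp [tailsOf, pairOff, alignEndGo]
  | cons s rest ih =>
    intro k
    obtain ⟨ts, h⟩ := tailsOf_head rest
    simp only [tailsOf, h, List.headI, pairOff, alignEndGo, List.sum_cons]
    have hpair : (axis - (s + rest.sum) - sp * k, axis - rest.sum - sp * k)
        = ((axis - (s + rest.sum) - sp * k, axis - (s + rest.sum) - sp * k + s) : Int × Int) := by
      have : axis - rest.sum - sp * k = axis - (s + rest.sum) - sp * k + s := by ring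
      rw [this]
    have hrec : pairOff axis sp (rest.sum :: ts) (k - 1)
        = alignEndGo sp (axis - (s + rest.sum) - sp * k + s + sp) rest := by
      have := ih (k - 1)
      rw [h] at this
      rw [this]
      congr 1
      ring
    rw [hpair, hrec]

-- ===== VERDICT (by name: the statement is the Claim_ definition above) =====
theorem align_end_spec : Claim_equal_align_end := by
  intro axis_size children_sizes spacing _
  unfold Spec_align_end align_end align_end_alt
  rw [pairOff_tailsOf]
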